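-- pv_equiv track=rewrite | github.com/BS-Algo/Algorithm | minjaeYoon/2024/programmers/Lv.0/1.py | solution
-- ===== SOURCE A (Python) =====
-- def solution(arr):
--     i = 0
--     stk = []
--
--     while i < len(arr):
--         if not stk:
--             stk.append(arr[i])
--             i += 1
--         elif stk and stk[-1] < arr[i]:
--             stk.append(arr[i])
--             i += 1
--         elif stk and stk[-1] >= arr[i]:
--             stk.pop()
--     return stk
-- ===== SOURCE B (Python) =====
-- def solution(arr):
--     # Single backward pass keeping the running minimum of the suffix seen so far.
--     out = []
--     m = None
--     for x in reversed(arr):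
--         if m is None or x < m:
--             out.append(x)
--             m = x
--     return out[::-1]
-- ===== Notes on version B (the rewrite author's own statement) =====
-- stated objective: faster
-- what changed: Replaces the push/pop stack while-loop with a single right-to-left pass that keeps each element strictly below the running minimum of the suffix to its right.
import Mathlib
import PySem

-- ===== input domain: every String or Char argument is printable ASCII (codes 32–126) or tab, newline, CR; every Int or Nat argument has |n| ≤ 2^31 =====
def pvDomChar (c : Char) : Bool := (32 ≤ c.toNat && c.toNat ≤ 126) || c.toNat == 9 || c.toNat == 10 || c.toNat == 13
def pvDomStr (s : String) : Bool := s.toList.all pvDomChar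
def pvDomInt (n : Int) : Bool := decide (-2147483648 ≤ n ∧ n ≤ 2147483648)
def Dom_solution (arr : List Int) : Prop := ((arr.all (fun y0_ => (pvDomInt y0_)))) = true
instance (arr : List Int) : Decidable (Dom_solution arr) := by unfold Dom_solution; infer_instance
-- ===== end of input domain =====

-- B replaces A's push/pop stack loop with one right-to-left pass over a running suffix minimum (simpler; same result).

-- ===== PORT A =====
-- while-loop of A: each branch mirrors Python (push / push / pop); stack kept in Python order (top = last).
def solLoop (arr : List Int) (i : Nat) (stk : List Int) : List Int :=
  if h : i < arr.length then
    match stk with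
    | [] => solLoop arr (i + 1) ([] ++ [arr[i]])               -- `if not stk: stk.append(arr[i])`
    | a :: l =>
      if (a :: l).getLast (by simp) < arr[i] then
        solLoop arr (i + 1) ((a :: l) ++ [arr[i]])             -- `stk[-1] < arr[i]: stk.append(arr[i])`
      else
        solLoop arr i ((a :: l).dropLast)                      -- `stk[-1] >= arr[i]: stk.pop()`
  else stk
termination_by 2 * (arr.length - i) + stk.length
decreasing_by
  · simp only [List.length_append, List.length_cons, List.length_nil]; omega
  · simp only [List.length_append, List.length_cons, List.length_nil]; omega
  · simp only [List.length_dropLast, List.length_cons]; omega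

def solution (arr : List Int) : List Int := solLoop arr 0 []

-- ===== PORT B =====
def solution_alt (arr : List Int) : List Int :=
  let p := arr.reverse.foldl
    (fun (p : Option Int × List Int) x =>
      match p.1 with
      | none => (some x, p.2 ++ [x])
      | some m => if x < m then (some x, p.2 ++ [x]) else p)
    (none, [])
  p.2.reverse

-- ===== PRECONDITION & SPEC =====
def Spec_solution (arr : List Int) (out : List Int) : Prop := out = solution_alt arr
instance (arr : List Int) (out : List Int) : Decidable (Spec_solution arr out) := by unfold Spec_solution; infer_instance

-- ===== CLAIM (what is proved, stated in full; the proofs are below) =====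
def Claim_equal_solution : Prop := ∀ (arr : List Int), Dom_solution arr → Spec_solution arr (solution arr)


-- ===== LEMMAS AND PROOFS =====

-- running minimum of a list, none = +infinity
def minI : List Int → Option Int
  | [] => none
  | x :: xs => match minI xs with
    | none => some x
    | some m => some (min x m)

def ltO (x : Int) : Option Int → Bool
  | none => true
  | some m => decide (x < m)

-- suffix-minima filter: keep x iff x is strictly below every later element
def filt : List Int → List Int
  | [] => []
  | x :: xs => if ltO x (minI xs) then x :: filt xs else filt xs

-- one whole iteration of A's outer progress: pop everything ≥ x, then push x
def step (s : List Int) (x : Int) : List Int := s.takeWhile (fun a => decide (a < x)) ++ [x]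

theorem mem_takeWhile_lt {s : List Int} {x a : Int}
    (h : a ∈ s.takeWhile (fun a => decide (a < x))) : a < x := by
  have := List.mem_takeWhile_imp h
  simpa using this

theorem pairwise_step {s : List Int} {x : Int} (h : List.Pairwise (· < ·) s) :
    List.Pairwise (· < ·) (step s x) := by
  unfold step
  rw [List.pairwise_append]
  refine ⟨List.Pairwise.sublist (List.takeWhile_sublist _) h, List.pairwise_singleton _ _, ?_⟩
  intro a ha b hb
  simp at hb; subst hb
  exact mem_takeWhile_lt ha

theorem pairwise_all_lt_last {ys : List Int} {t x : Int}
    (h : List.Pairwise (· < ·) (ys ++ [t])) (ht : t < x) {a : Int} (ha : a ∈ ys ++ [t]) :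
    a < x := by
  rw [List.pairwise_append] at h
  rcases List.mem_append.1 ha with h1 | h1
  · exact lt_trans (h.2.2 a h1 t (by simp)) ht
  · simp at h1; subst h1; exact ht

-- pop-loop elimination: on a strictly increasing stack, pops-then-push of one x equals `step`
theorem pops (arr : List Int) (i : Nat) (h : i < arr.length) :
    ∀ (n : Nat) (stk : List Int), stk.length ≤ n → List.Pairwise (fun a b : Int => a < b) stk →
      solLoop arr i stk = solLoop arr (i + 1) (step stk arr[i]) := by
  intro n
  induction n with
  | zero =>
    intro stk hlen _
    have hnil : stk = [] := List.eq_nil_of_length_eq_zero (Nat.le_zero.1 hlen)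
    subst hnil
    rw [solLoop, dif_pos h]
    simp [step]
  | succ n ih =>
    intro stk hlen hp
    cases stk with
    | nil =>
      rw [solLoop, dif_pos h]
      simp [step]
    | cons a l =>
      obtain ⟨ys, t, hconc⟩ := (List.eq_nil_or_concat (a :: l)).resolve_left (by simp)
      rw [List.concat_eq_append] at hconc
      rw [solLoop, dif_pos h]
      show (if (a :: l).getLast (by simp) < arr[i] then solLoop arr (i + 1) ((a :: l) ++ [arr[i]])
            else solLoop arr i ((a :: l).dropLast))
          = solLoop arr (i + 1) (step (a :: l) arr[i])
      have hgl : (a :: l).getLast (by simp) = t := by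
        rw [List.getLast_congr (by simp) (by simp) hconc]; exact List.getLast_concat
      rw [hconc] at hp hlen
      rw [hgl, hconc]
      by_cases ht : t < arr[i]
      · rw [if_pos ht]
        have hall : ∀ b ∈ ys ++ [t], (fun b => decide (b < arr[i])) b = true := by
          intro b hb
          simpa using pairwise_all_lt_last hp ht hb
        rw [step, List.takeWhile_eq_self_iff.2 hall]
      · rw [if_neg ht]
        have hdl : (ys ++ [t]).dropLast = ys := by simp
        have hlen' : ys.length ≤ n := by simp at hlen; omega
        have hp' : List.Pairwise (fun a b : Int => a < b) ys := by
          rw [List.pairwise_append] at hp; exact hp.1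
        rw [hdl, ih ys hlen' hp']
        congr 1
        unfold step
        congr 1
        rw [List.takeWhile_append]
        have hxt : (fun b => decide (b < arr[i])) t = false := by simpa using ht
        split_ifs with hcond
        · have hys : ys.takeWhile (fun b => decide (b < arr[i])) = ys :=
            List.Sublist.eq_of_length (List.takeWhile_sublist _) hcond
          simp [hys, hxt]
        · rfl

theorem takeWhile_ext {p q : Int → Bool} (h : ∀ a, p a = q a) (l : List Int) :
    l.takeWhile p = l.takeWhile q := by
  have hpq : p = q := funext h
  rw [hpq]

theorem ltO_min (a x m : Int) :
    decide (ltO a (some m) = true ∧ decide (a < x) = true) = decide (a < min x m) := by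
  show decide (decide (a < m) = true ∧ decide (a < x) = true) = _
  rw [decide_eq_decide, min_def]
  split_ifs with h <;> simp only [decide_eq_true_eq] <;> constructor <;> intro h' <;> omega

theorem foldl_step (xs : List Int) : ∀ s : List Int,
    xs.foldl step s = s.takeWhile (fun a => ltO a (minI xs)) ++ filt xs := by
  induction xs with
  | nil =>
    intro s
    simp only [List.foldl_nil, minI, filt, List.append_nil]
    exact (List.takeWhile_eq_self_iff.2 (fun a _ => rfl)).symm
  | cons x xs ih =>
    intro s
    rw [List.foldl_cons, ih (step s x)]
    unfold step
    rw [List.takeWhile_append]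
    by_cases hx : ltO x (minI xs) = true
    · have hcond : ((s.takeWhile (fun a => decide (a < x))).takeWhile
          (fun a => ltO a (minI xs))).length = (s.takeWhile (fun a => decide (a < x))).length := by
        rw [List.takeWhile_eq_self_iff.2]
        intro a ha
        have hax : a < x := mem_takeWhile_lt ha
        cases hm : minI xs with
        | none => simp [ltO]
        | some m =>
          have : x < m := by simpa [ltO, hm] using hx
          simp [ltO]; omega
      rw [if_pos hcond]
      have htw : List.takeWhile (fun a => ltO a (minI xs)) [x] = [x] := by
        simp [List.takeWhile, hx]
      rw [htw]
      have hmin : List.takeWhile (fun a => ltO a (minI (x :: xs))) s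
          = s.takeWhile (fun a => decide (a < x)) := by
        apply takeWhile_ext
        intro a
        cases hm : minI xs with
        | none => simp [minI, hm, ltO]
        | some m =>
          have hxm : x < m := by simpa [ltO, hm] using hx
          have : minI (x :: xs) = some (min x m) := by simp [minI, hm]
          rw [this]
          show decide (a < min x m) = decide (a < x)
          rw [decide_eq_decide, min_def]
          split_ifs <;> constructor <;> intro <;> omega
      have hfilt : filt (x :: xs) = x :: filt xs := by
        rw [filt, if_pos hx]
      rw [hmin, hfilt]
      simp
    · cases hm : minI xs with
      | none => simp [ltO, hm] at hx
      | some m =>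
        have hmx : m ≤ x := by simpa [ltO, hm] using hx
        have hmin2 : minI (x :: xs) = some (min x m) := by simp [minI, hm]
        have hfilt : filt (x :: xs) = filt xs := by rw [filt, if_neg hx]
        have htww : (s.takeWhile (fun a => decide (a < x))).takeWhile
              (fun a => ltO a (some m))
            = s.takeWhile (fun a => ltO a (minI (x :: xs))) := by
          rw [List.takeWhile_takeWhile, hmin2]
          apply takeWhile_ext
          intro a
          exact ltO_min a x m
        have hxfail : List.takeWhile (fun a => ltO a (some m)) [x] = [] := by
          simp only [List.takeWhile]
          have hf : ltO x (some m) = false := by simp [ltO]; omega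
          simp [hf]
        rw [hfilt]
        split_ifs with hcond
        · have heq : s.takeWhile (fun a => decide (a < x))
              = (s.takeWhile (fun a => decide (a < x))).takeWhile (fun a => ltO a (some m)) :=
            (List.Sublist.eq_of_length (List.takeWhile_sublist _) hcond).symm
          rw [hxfail, List.append_nil]
          conv_lhs => rw [heq]
          rw [htww]
        · rw [htww]

theorem main_loop (arr : List Int) : ∀ (k i : Nat), arr.length - i ≤ k →
    ∀ stk : List Int, List.Pairwise (fun a b : Int => a < b) stk →
      solLoop arr i stk = (arr.drop i).foldl step stk := by
  intro k
  induction k with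
  | zero =>
    intro i hk stk _
    have hge : arr.length ≤ i := by omega
    rw [solLoop, dif_neg (by omega), List.drop_of_length_le hge]
    rfl
  | succ k ih =>
    intro i hk stk hp
    by_cases h : i < arr.length
    · rw [pops arr i h stk.length stk (Nat.le_refl _) hp,
        ih (i + 1) (by omega) (step stk arr[i]) (pairwise_step hp),
        List.drop_eq_getElem_cons h, List.foldl_cons]
    · rw [solLoop, dif_neg h, List.drop_of_length_le (by omega)]
      rfl

theorem foldr_inv (arr : List Int) :
    arr.foldr (fun x (p : Option Int × List Int) =>
      match p.1 with
      | none => (some x, p.2 ++ [x])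
      | some m => if x < m then (some x, p.2 ++ [x]) else p) (none, [])
    = (minI arr, (filt arr).reverse) := by
  induction arr with
  | nil => simp [minI, filt]
  | cons x xs ih =>
    rw [List.foldr_cons, ih]
    cases hm : minI xs with
    | none =>
      simp [minI, hm, filt, ltO]
    | some m =>
      by_cases hxm : x < m
      · have : min x m = x := by omega
        simp [minI, hm, filt, ltO, hxm, this]
      · have : min x m = m := by omega
        simp [minI, hm, filt, ltO, hxm, this]

theorem alt_filt (arr : List Int) : solution_alt arr = filt arr := by
  unfold solution_alt
  rw [List.foldl_reverse]
  have := foldr_inv arr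
  simp only [this]
  simp

-- ===== VERDICT (by name: the statement is the Claim_ definition above) =====
theorem solution_spec : Claim_equal_solution := by
  intro arr _
  show solution arr = solution_alt arr
  rw [alt_filt, solution, main_loop arr arr.length 0 (by omega) [] List.Pairwise.nil,
      List.drop_zero, foldl_step]
  simp
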